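-- pv_equiv track=rewrite | github.com/frandoLin/smart_health_insights | backend/data_ingestion/chunk.py | recursive_chunking
-- ===== SOURCE A (Python) =====
-- def recursive_chunking(document, chunk_size=256):
--     """
--     Split document into chunks recursively.
--     Uses a simple word-based approach.
--     Args:
--         document: Text document to split
--         chunk_size: Maximum number of words per chunk
--     Returns:
--         List of text chunks
--     """
--
--     len_doc = len(document.split())
--
--     if len_doc <= chunk_size:
--         return [document]
--
--     mid = len_doc // 2
--     left_chunk = document[:mid]
--     right_chunk = document[mid:]
--
--     if len(left_chunk.split()) <=chunk_size or len(right_chunk.split()) <= chunk_size: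
--         return [left_chunk, right_chunk]
--
--     return recursive_chunking(left_chunk, chunk_size) + recursive_chunking(right_chunk, chunk_size)
-- ===== SOURCE B (Python) =====
-- def recursive_chunking(document, chunk_size=256):
--     """
--     Split document into chunks iteratively with an explicit LIFO stack
--     of pending fragments (same chunks, same order as the recursive version).
--     """
--     chunks = []
--     stack = [document]
--     while stack:
--         frag = stack.pop()
--         if len(frag.split()) <= chunk_size:
--             chunks.append(frag)
--             continue
--         mid = len(frag.split()) // 2
--         left, right = frag[:mid], frag[mid:]
--         if len(left.split()) <= chunk_size or len(right.split()) <= chunk_size: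
--             chunks.append(left)
--             chunks.append(right)
--         else:
--             stack.append(right)
--             stack.append(left)
--     return chunks
-- ===== Notes on version B (the rewrite author's own statement) =====
-- stated objective: alternative
-- what changed: Replaced A's self-recursive divide-and-conquer with an iterative worklist: an explicit LIFO stack of pending fragments and an output list built in order (right half pushed before left).
import Mathlib
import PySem

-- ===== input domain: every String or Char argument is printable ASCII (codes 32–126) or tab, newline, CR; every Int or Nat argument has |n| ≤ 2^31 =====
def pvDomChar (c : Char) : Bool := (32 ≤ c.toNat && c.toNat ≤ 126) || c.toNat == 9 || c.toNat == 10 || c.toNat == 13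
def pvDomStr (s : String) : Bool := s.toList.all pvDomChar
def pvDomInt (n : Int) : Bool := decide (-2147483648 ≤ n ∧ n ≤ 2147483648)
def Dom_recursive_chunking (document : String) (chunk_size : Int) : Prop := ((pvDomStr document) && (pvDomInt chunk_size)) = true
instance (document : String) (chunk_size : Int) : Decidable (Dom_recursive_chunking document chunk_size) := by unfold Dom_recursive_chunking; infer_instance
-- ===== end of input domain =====

-- B replaces A's self-recursion by an explicit LIFO stack of pending fragments (alternative decomposition, same chunks in the same order).


-- ===== PORT A =====
-- Fuel (document.toList.length + 1) only totalizes A's recursion, which in Python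
-- diverges exactly for chunk_size < 0 (excluded by Pre_); inside Pre_ the fuel never runs out.
def pvChunkA : Nat → String → Int → List String
  | 0, _, _ => []
  | fuel+1, document, chunk_size =>
    let len_doc : Int := ((PySem.Str.split₀ document).length : Int)
    if len_doc ≤ chunk_size then [document]
    else
      let mid := PySem.Int.floordiv len_doc 2
      let left_chunk := PySem.Str.slice document none (some mid)
      let right_chunk := PySem.Str.slice document (some mid) none
      if ((PySem.Str.split₀ left_chunk).length : Int) ≤ chunk_size ∨
         ((PySem.Str.split₀ right_chunk).length : Int) ≤ chunk_size then
        [left_chunk, right_chunk]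
      else
        pvChunkA fuel left_chunk chunk_size ++ pvChunkA fuel right_chunk chunk_size

def recursive_chunking (document : String) (chunk_size : Int) : List String :=
  pvChunkA (document.toList.length + 1) document chunk_size

-- ===== PORT B =====
-- Fuel (2 * document.toList.length + 2) only totalizes the while-loop, which in Python
-- runs forever exactly for chunk_size < 0 (excluded by Pre_); inside Pre_ it never runs out.
-- 'chunks.append x' is 'x :: acc' with one final reverse.
def pvChunkB : Nat → List String → Int → List String → List String
  | 0, _, _, acc => acc.reverse
  | _+1, [], _, acc => acc.reverse
  | fuel+1, frag :: stack, chunk_size, acc =>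
    if ((PySem.Str.split₀ frag).length : Int) ≤ chunk_size then
      pvChunkB fuel stack chunk_size (frag :: acc)
    else
      let mid := PySem.Int.floordiv ((PySem.Str.split₀ frag).length : Int) 2
      let left := PySem.Str.slice frag none (some mid)
      let right := PySem.Str.slice frag (some mid) none
      if ((PySem.Str.split₀ left).length : Int) ≤ chunk_size ∨
         ((PySem.Str.split₀ right).length : Int) ≤ chunk_size then
        pvChunkB fuel stack chunk_size (right :: left :: acc)
      else
        pvChunkB fuel (left :: right :: stack) chunk_size acc

def recursive_chunking_alt (document : String) (chunk_size : Int) : List String :=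
  pvChunkB (2 * document.toList.length + 2) [document] chunk_size []

-- ===== PRECONDITION & SPEC =====
-- Pre_ excludes negative chunk_size: there every fragment's word count exceeds chunk_size,
-- A recurses forever and dies with RecursionError (B's loop also never terminates there).
def Pre_recursive_chunking (document : String) (chunk_size : Int) : Prop := 0 ≤ chunk_size
instance (document : String) (chunk_size : Int) : Decidable (Pre_recursive_chunking document chunk_size) := by unfold Pre_recursive_chunking; infer_instance
def pvWitness_recursive_chunking : String × Int := ("a b c", 1)

def Spec_recursive_chunking (document : String) (chunk_size : Int) (out : List String) : Prop := out = recursive_chunking_alt document chunk_size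
instance (document : String) (chunk_size : Int) (out : List String) : Decidable (Spec_recursive_chunking document chunk_size out) := by unfold Spec_recursive_chunking; infer_instance

-- ===== CLAIM (what is proved, stated in full; the proofs are below) =====
def Claim_equal_recursive_chunking : Prop := ∀ (document : String) (chunk_size : Int), Dom_recursive_chunking document chunk_size → Pre_recursive_chunking document chunk_size → Spec_recursive_chunking document chunk_size (recursive_chunking document chunk_size)

-- ===== LEMMAS AND PROOFS =====

-- abbreviations for the derived fragments
def pvMid (d : String) : Int := PySem.Int.floordiv ((PySem.Str.split₀ d).length : Int) 2
def pvL (d : String) : String := PySem.Str.slice d none (some (pvMid d))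
def pvR (d : String) : String := PySem.Str.slice d (some (pvMid d)) none

-- Reference function: the chunking recursion by well-founded recursion on character length,
-- guarded by the size bounds that hold in the recursive branch whenever 0 ≤ chunk_size.
def pvG (cs : Int) (d : String) : List String :=
  if ((PySem.Str.split₀ d).length : Int) ≤ cs then [d]
  else if ((PySem.Str.split₀ (pvL d)).length : Int) ≤ cs ∨
          ((PySem.Str.split₀ (pvR d)).length : Int) ≤ cs then [pvL d, pvR d]
  else if h : 0 < (pvL d).toList.length ∧ (pvL d).toList.length < d.toList.length ∧
              0 < (pvR d).toList.length ∧ (pvR d).toList.length < d.toList.length then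
    pvG cs (pvL d) ++ pvG cs (pvR d)
  else []
  termination_by d.toList.length
  decreasing_by
  · exact h.2.1
  · exact h.2.2.2

-- Exact number of loop iterations B spends on one fragment (same guarded recursion).
def pvCost (cs : Int) (d : String) : Nat :=
  if ((PySem.Str.split₀ d).length : Int) ≤ cs then 1
  else if ((PySem.Str.split₀ (pvL d)).length : Int) ≤ cs ∨
          ((PySem.Str.split₀ (pvR d)).length : Int) ≤ cs then 1
  else if h : 0 < (pvL d).toList.length ∧ (pvL d).toList.length < d.toList.length ∧
              0 < (pvR d).toList.length ∧ (pvR d).toList.length < d.toList.length then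
    1 + pvCost cs (pvL d) + pvCost cs (pvR d)
  else 1
  termination_by d.toList.length
  decreasing_by
  · exact h.2.1
  · exact h.2.2.2

lemma pvSplitLen (s : String) : (PySem.Str.split₀ s).length = (PySem.Chars.split₀ s.toList).length := by
  rw [← PySem.Str.split₀_map_toList, List.length_map]

lemma pvMid_eq (d : String) : pvMid d = (((PySem.Str.split₀ d).length / 2 : Nat) : Int) := by
  unfold pvMid; exact_mod_cast PySem.Int.floordiv_natCast (PySem.Str.split₀ d).length 2

lemma pvL_toList (d : String) : (pvL d).toList = d.toList.take ((PySem.Str.split₀ d).length / 2) := by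
  rw [pvL, pvMid_eq, PySem.Str.toList_slice, PySem.Chars.slice_eq_listSlice,
    PySem.List.slice_to_natCast]

lemma pvR_toList (d : String) : (pvR d).toList = d.toList.drop ((PySem.Str.split₀ d).length / 2) := by
  rw [pvR, pvMid_eq, PySem.Str.toList_slice, PySem.Chars.slice_eq_listSlice,
    PySem.List.slice_from_natCast]

lemma pvSplit_ne_nil {s : String} {cs : Int} (hcs : 0 ≤ cs)
    (h : ¬ ((PySem.Str.split₀ s).length : Int) ≤ cs) : s.toList ≠ [] := by
  intro hnil
  apply h
  rw [pvSplitLen, hnil]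
  simpa using hcs

lemma pvBounds {cs : Int} (hcs : 0 ≤ cs) {d : String}
    (hL : ¬ ((PySem.Str.split₀ (pvL d)).length : Int) ≤ cs)
    (hR : ¬ ((PySem.Str.split₀ (pvR d)).length : Int) ≤ cs) :
    0 < (pvL d).toList.length ∧ (pvL d).toList.length < d.toList.length ∧
    0 < (pvR d).toList.length ∧ (pvR d).toList.length < d.toList.length := by
  have hLne := pvSplit_ne_nil hcs hL
  have hRne := pvSplit_ne_nil hcs hR
  rw [pvL_toList] at hLne ⊢
  rw [pvR_toList] at hRne ⊢
  have h1 : ¬ ((PySem.Str.split₀ d).length / 2 = 0 ∨ d.toList = []) := by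
    simpa [List.take_eq_nil_iff] using hLne
  have h2 : ¬ d.toList.length ≤ (PySem.Str.split₀ d).length / 2 := by
    simpa [List.drop_eq_nil_iff] using hRne
  push Not at h1
  simp only [List.length_take, List.length_drop]
  omega

lemma pvChunkA_eq_pvG {cs : Int} (hcs : 0 ≤ cs) :
    ∀ fuel d, d.toList.length < fuel → pvChunkA fuel d cs = pvG cs d := by
  intro fuel
  induction fuel with
  | zero => intro d h; exact absurd h (Nat.not_lt_zero _)
  | succ f ih =>
    intro d hlen
    rw [pvG]
    simp only [pvChunkA, pvL, pvR, pvMid]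
    split_ifs with h1 h2 h3
    · rfl
    · rfl
    · have hf := Nat.lt_succ_iff.mp hlen
      rw [ih _ (Nat.lt_of_lt_of_le h3.2.1 hf), ih _ (Nat.lt_of_lt_of_le h3.2.2.2 hf)]
    · exfalso
      rw [not_or] at h2
      have hb := pvBounds hcs h2.1 h2.2
      simp only [pvL, pvR, pvMid] at hb h3
      exact h3 hb

lemma pvChunkB_nil (f : Nat) (cs : Int) (acc : List String) :
    pvChunkB f [] cs acc = acc.reverse := by
  cases f <;> rfl

lemma pvChunkB_step {cs : Int} (hcs : 0 ≤ cs) :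
    ∀ n d, d.toList.length ≤ n → ∀ st acc fuel,
      pvChunkB (pvCost cs d + fuel) (d :: st) cs acc =
      pvChunkB fuel st cs ((pvG cs d).reverse ++ acc) := by
  intro n
  induction n with
  | zero =>
    intro d hlen st acc fuel
    have hnil : d.toList = [] := List.eq_nil_of_length_eq_zero (Nat.le_zero.mp hlen)
    have h1 : ((PySem.Str.split₀ d).length : Int) ≤ cs := by
      rw [pvSplitLen, hnil]; simpa using hcs
    rw [pvCost, pvG, if_pos h1, if_pos h1, Nat.add_comm 1 fuel]
    simp only [pvChunkB]
    rw [if_pos h1]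
    simp
  | succ m ih =>
    intro d hlen st acc fuel
    by_cases h1 : ((PySem.Str.split₀ d).length : Int) ≤ cs
    · rw [pvCost, pvG, if_pos h1, if_pos h1, Nat.add_comm 1 fuel]
      simp only [pvChunkB]
      rw [if_pos h1]
      simp
    · by_cases h2 : ((PySem.Str.split₀ (pvL d)).length : Int) ≤ cs ∨
          ((PySem.Str.split₀ (pvR d)).length : Int) ≤ cs
      · rw [pvCost, pvG, if_neg h1, if_neg h1, if_pos h2, if_pos h2, Nat.add_comm 1 fuel]
        simp only [pvChunkB, pvL, pvR, pvMid]
        simp only [pvL, pvR, pvMid] at h2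
        rw [if_neg h1, if_pos h2]
        simp
      · have h2' := h2
        rw [not_or] at h2
        have hb := pvBounds hcs h2.1 h2.2
        have hLn : (pvL d).toList.length ≤ m := by omega
        have hRn : (pvR d).toList.length ≤ m := by omega
        rw [pvCost, pvG, if_neg h1, if_neg h1, if_neg h2', if_neg h2', dif_pos hb, dif_pos hb]
        have harith : 1 + pvCost cs (pvL d) + pvCost cs (pvR d) + fuel
            = (pvCost cs (pvL d) + (pvCost cs (pvR d) + fuel)) + 1 := by omega
        rw [harith]
        simp only [pvChunkB]
        simp only [pvL, pvR, pvMid] at h2' hLn hRn ⊢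
        rw [if_neg h1, if_neg h2', ih _ hLn, ih _ hRn]
        simp [List.reverse_append, List.append_assoc]

lemma pvCost_le {cs : Int} (hcs : 0 ≤ cs) :
    ∀ n d, d.toList.length ≤ n →
      pvCost cs d ≤ 2 * d.toList.length + 1 ∧
      (1 ≤ d.toList.length → pvCost cs d ≤ 2 * d.toList.length - 1) := by
  intro n
  induction n with
  | zero =>
    intro d hlen
    have hnil : d.toList = [] := List.eq_nil_of_length_eq_zero (Nat.le_zero.mp hlen)
    have h1 : ((PySem.Str.split₀ d).length : Int) ≤ cs := by
      rw [pvSplitLen, hnil]; simpa using hcs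
    rw [pvCost, if_pos h1]
    constructor
    · omega
    · intro h; omega
  | succ m ih =>
    intro d hlen
    by_cases h1 : ((PySem.Str.split₀ d).length : Int) ≤ cs
    · rw [pvCost, if_pos h1]
      constructor
      · omega
      · intro h; omega
    · by_cases h2 : ((PySem.Str.split₀ (pvL d)).length : Int) ≤ cs ∨
          ((PySem.Str.split₀ (pvR d)).length : Int) ≤ cs
      · rw [pvCost, if_neg h1, if_pos h2]
        constructor
        · omega
        · intro h; omega
      · have h2' := h2
        rw [not_or] at h2
        have hb := pvBounds hcs h2.1 h2.2
        have hLn : (pvL d).toList.length ≤ m := by omega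
        have hRn : (pvR d).toList.length ≤ m := by omega
        rw [pvCost, if_neg h1, if_neg h2', dif_pos hb]
        have ihL := (ih _ hLn).2 hb.1
        have ihR := (ih _ hRn).2 hb.2.2.1
        have e1 : (pvL d).toList.length = min ((PySem.Str.split₀ d).length / 2) d.toList.length := by
          rw [pvL_toList, List.length_take]
        have e2 : (pvR d).toList.length = d.toList.length - ((PySem.Str.split₀ d).length / 2) := by
          rw [pvR_toList, List.length_drop]
        constructor
        · omega
        · intro h; omega

-- ===== VERDICT (by name: the statement is the Claim_ definition above) =====
theorem recursive_chunking_spec : Claim_equal_recursive_chunking := by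
  unfold Claim_equal_recursive_chunking
  intro document chunk_size _ hpre
  have hcs : (0:Int) ≤ chunk_size := hpre
  unfold Spec_recursive_chunking recursive_chunking recursive_chunking_alt
  rw [pvChunkA_eq_pvG hcs _ _ (Nat.lt_succ_self _)]
  have hc := (pvCost_le hcs document.toList.length document le_rfl).1
  have harith : 2 * document.toList.length + 2
      = pvCost chunk_size document + (2 * document.toList.length + 2 - pvCost chunk_size document) := by
    omega
  rw [harith, pvChunkB_step hcs document.toList.length document le_rfl, pvChunkB_nil]
  simp
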